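-- pv_equiv track=rewrite | github.com/Oichkatzelesfrettschen/steinmarder | src/re/sass/scripts/summarize_uplop3_runtime_classes.py | class_for
-- ===== SOURCE A (Python) =====
-- def class_for(label: str, parsed: dict[str, dict[str, str]]) -> str:
--     vals = [parsed.get(str(i), {}).get(label, "n/a") for i in range(4)]
--     if any(v == "n/a" for v in vals):
--         return "runtime_blocked"
--     if all(v == "same_as_baseline" for v in vals):
--         return "inert"
--     if any(v == "diff_from_baseline" for v in vals):
--         if all(v in {"same_as_baseline", "diff_from_baseline"} for v in vals):
--             return "stable_but_different"
--     return "mixed"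
-- ===== SOURCE B (Python) =====
-- _SEVERITY = {"same_as_baseline": 0, "diff_from_baseline": 1, "n/a": 3}
-- _CLASSES = ["inert", "stable_but_different", "mixed", "runtime_blocked"]
--
-- def class_for(label: str, parsed: dict[str, dict[str, str]]) -> str:
--     worst = max(_SEVERITY.get(parsed.get(str(i), {}).get(label, "n/a"), 2)
--                 for i in range(4))
--     return _CLASSES[worst]
-- ===== Notes on version B (the rewrite author's own statement) =====
-- stated objective: alternative
-- what changed: Replaces the list of values plus five any/all predicate scans and an if-chain with a severity lattice: each value is mapped to a numeric severity (same=0, diff=1, other=2, n/a=3), the four severities are reduced with max, and the class is read from a lookup table indexed by the maximum.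
import Mathlib
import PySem

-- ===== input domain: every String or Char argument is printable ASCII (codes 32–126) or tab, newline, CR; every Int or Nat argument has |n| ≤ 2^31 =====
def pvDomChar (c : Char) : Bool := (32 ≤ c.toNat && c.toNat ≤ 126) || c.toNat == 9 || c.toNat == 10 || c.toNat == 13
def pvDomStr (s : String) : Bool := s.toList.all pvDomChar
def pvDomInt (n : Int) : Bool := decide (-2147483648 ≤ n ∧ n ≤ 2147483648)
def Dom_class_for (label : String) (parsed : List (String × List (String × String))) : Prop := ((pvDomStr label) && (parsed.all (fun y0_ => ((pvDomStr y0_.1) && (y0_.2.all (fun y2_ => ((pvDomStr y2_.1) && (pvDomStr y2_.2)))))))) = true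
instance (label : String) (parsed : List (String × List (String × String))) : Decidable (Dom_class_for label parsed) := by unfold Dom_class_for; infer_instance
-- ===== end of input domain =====

-- B replaces A's value list and any/all predicate scans by a severity lattice: each value maps to a numeric severity, the maximum severity indexes a class table (alternative decomposition, same behaviour).

-- ===== PORT A =====
-- dict.get(k, dflt) on an association list: first match or default
def dictGetD {α : Type} (d : List (String × α)) (k : String) (dflt : α) : α :=
  match d.find? (fun p => p.1 == k) with
  | some p => p.2
  | none => dflt

def class_for (label : String) (parsed : List (String × List (String × String))) : String :=
  let vals := (PySem.List.pyRange 0 4 1).map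
    (fun i => dictGetD (dictGetD parsed (PySem.Int.toStr i) []) label "n/a")
  if vals.any (fun v => v == "n/a") then "runtime_blocked"
  else if vals.all (fun v => v == "same_as_baseline") then "inert"
  else if vals.any (fun v => v == "diff_from_baseline") then
    if vals.all (fun v => v == "same_as_baseline" || v == "diff_from_baseline") then
      "stable_but_different"
    else "mixed"
  else "mixed"

-- ===== PORT B =====
def pvSeverityTable : List (String × Nat) :=
  [("same_as_baseline", 0), ("diff_from_baseline", 1), ("n/a", 3)]

def pvClassTable : List String :=
  ["inert", "stable_but_different", "mixed", "runtime_blocked"]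

def class_for_alt (label : String) (parsed : List (String × List (String × String))) : String :=
  let sevs := (PySem.List.pyRange 0 4 1).map
    (fun i => dictGetD pvSeverityTable
      (dictGetD (dictGetD parsed (PySem.Int.toStr i) []) label "n/a") 2)
  let worst := match sevs with
    | [] => 0
    | s :: rest => rest.foldl max s
  pvClassTable.getD worst ""

-- ===== PRECONDITION & SPEC =====
def Spec_class_for (label : String) (parsed : List (String × List (String × String))) (out : String) : Prop := out = class_for_alt label parsed
instance (label : String) (parsed : List (String × List (String × String))) (out : String) : Decidable (Spec_class_for label parsed out) := by unfold Spec_class_for; infer_instance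

-- ===== CLAIM (what is proved, stated in full; the proofs are below) =====
def Claim_equal_class_for : Prop := ∀ (label : String) (parsed : List (String × List (String × String))), Dom_class_for label parsed → Spec_class_for label parsed (class_for label parsed)

-- ===== LEMMAS AND PROOFS =====

-- severity of a single value, as B computes it
def sev (v : String) : Nat := dictGetD pvSeverityTable v 2

theorem sev_cases (v : String) :
    (v = "n/a" ∧ sev v = 3) ∨
    (v = "same_as_baseline" ∧ sev v = 0) ∨
    (v = "diff_from_baseline" ∧ sev v = 1) ∨
    (v ≠ "n/a" ∧ v ≠ "same_as_baseline" ∧ v ≠ "diff_from_baseline" ∧ sev v = 2) := by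
  by_cases h1 : v = "n/a" <;> by_cases h2 : v = "same_as_baseline" <;>
    by_cases h3 : v = "diff_from_baseline" <;> first
    | (subst h1; decide) | (subst h2; decide) | (subst h3; decide)
    | (refine Or.inr (Or.inr (Or.inr ⟨h1, h2, h3, ?_⟩))
       simp [sev, dictGetD, pvSeverityTable, List.find?,
         show ("same_as_baseline" == v) = false from beq_eq_false_iff_ne.mpr (Ne.symm h2),
         show ("diff_from_baseline" == v) = false from beq_eq_false_iff_ne.mpr (Ne.symm h3),
         show ("n/a" == v) = false from beq_eq_false_iff_ne.mpr (Ne.symm h1)])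

-- the heart: for any four values, A's if-chain equals B's max-severity table lookup
theorem key (v0 v1 v2 v3 : String) :
    (let vals := [v0, v1, v2, v3]
     if vals.any (fun v => v == "n/a") then "runtime_blocked"
     else if vals.all (fun v => v == "same_as_baseline") then "inert"
     else if vals.any (fun v => v == "diff_from_baseline") then
       if vals.all (fun v => v == "same_as_baseline" || v == "diff_from_baseline") then
         "stable_but_different"
       else "mixed"
     else "mixed")
    = pvClassTable.getD ([sev v1, sev v2, sev v3].foldl max (sev v0)) "" := by
  rcases sev_cases v0 with ⟨e0, s0⟩ | ⟨e0, s0⟩ | ⟨e0, s0⟩ | ⟨e0a, e0b, e0c, s0⟩ <;>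
  rcases sev_cases v1 with ⟨e1, s1⟩ | ⟨e1, s1⟩ | ⟨e1, s1⟩ | ⟨e1a, e1b, e1c, s1⟩ <;>
  rcases sev_cases v2 with ⟨e2, s2⟩ | ⟨e2, s2⟩ | ⟨e2, s2⟩ | ⟨e2a, e2b, e2c, s2⟩ <;>
  rcases sev_cases v3 with ⟨e3, s3⟩ | ⟨e3, s3⟩ | ⟨e3, s3⟩ | ⟨e3a, e3b, e3c, s3⟩ <;>
    simp_all [pvClassTable, List.foldl]

-- ===== VERDICT (by name: the statement is the Claim_ definition above) =====
theorem class_for_spec : Claim_equal_class_for := by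
  intro label parsed _
  unfold Spec_class_for class_for class_for_alt
  rw [show PySem.List.pyRange 0 4 1 = [0, 1, 2, 3] from by decide]
  simp only [List.map]
  exact key _ _ _ _
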